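-- pv_equiv track=rewrite | github.com/chirag9127/programming_puzzles | misc/page_display.py | page_display
-- ===== SOURCE A (Python) =====
-- def page_display(words, limit):
--     curr_set = set()
--     curr_line = []
--     res = []
--     i = 0
--     while len(words) > 0:
--         if words[i] not in curr_set:
--             curr_line.append(words[i])
--             curr_set.add(words[i])
--             words.pop(i)
--         else:
--             i += 1
--         if len(curr_line) == limit or i == len(words):
--             curr_set = set()
--             res.append(curr_line)
--             curr_line = []
--             i = 0
--     return res
-- ===== SOURCE B (Python) =====
-- def page_display(words, limit):
--     # Return-value equivalent to A; does not mutate `words` (A empties it in place).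
--     res = []
--     ws = list(words)
--     while ws:
--         distinct = list(dict.fromkeys(ws))
--         line = distinct[:limit] if limit > 0 else distinct
--         taken = set(line)
--         out = []
--         for w in ws:
--             if w in taken:
--                 taken.discard(w)
--             else:
--                 out.append(w)
--         ws = out
--         res.append(line)
--     return res
-- ===== Notes on version B (the rewrite author's own statement) =====
-- stated objective: simpler
-- what changed: Each page is computed in closed form as the first `limit` distinct remaining words (ordered dedup + slice) followed by one filtering pass that drops their first occurrences, replacing A's single while-loop state machine with an index, in-place pops and flush conditions; B also does not mutate the input list (A empties it).
import Mathlib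
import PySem

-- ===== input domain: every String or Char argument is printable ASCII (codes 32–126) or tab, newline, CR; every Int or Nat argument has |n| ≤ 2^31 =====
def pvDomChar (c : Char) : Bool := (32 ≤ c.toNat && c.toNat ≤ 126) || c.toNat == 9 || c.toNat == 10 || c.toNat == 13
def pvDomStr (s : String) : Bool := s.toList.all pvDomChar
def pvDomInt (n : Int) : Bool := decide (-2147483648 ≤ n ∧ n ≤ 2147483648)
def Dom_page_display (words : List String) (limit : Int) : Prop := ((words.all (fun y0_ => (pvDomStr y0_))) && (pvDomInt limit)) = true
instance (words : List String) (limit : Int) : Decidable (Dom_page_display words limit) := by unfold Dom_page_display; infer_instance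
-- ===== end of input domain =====

-- B is a simpler re-implementation: each page is the first `limit` distinct remaining words in
-- closed form (ordered dedup + slice) and one filtering pass removes their first occurrences,
-- replacing A's index/pop state machine.  Equivalence is about the RETURN value: Python A empties
-- the `words` list in place, B does not mutate it.

-- ===== PORT A =====
-- literal transliteration of A's while loop: state (words, i, curr_set, curr_line, res)
theorem pv_pyGet_lt {α : Type} (xs : List α) (i : Nat) (x : α)
    (h : PySem.List.pyGet? xs (i : Int) = some x) : i < xs.length := by
  rw [PySem.List.pyGet?_natCast] at h
  exact (List.getElem?_eq_some_iff.mp h).1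

def pageA_loop (limit : Int) (ws : List String) (i : Nat) (cs : PySem.Set String)
    (cl : List String) (res : List (List String)) : List (List String) :=
  if _hws : ws.length = 0 then res
  else
    match hg : PySem.List.pyGet? ws (i : Int) with
    | none => res      -- unreachable (Python would raise IndexError); the loop keeps i in range
    | some w =>
      if hmem : PySem.Set.contains cs w = false then
        -- words[i] not in curr_set: take it
        match hp : PySem.List.pop? ws (i : Int) with
        | none => res  -- unreachable: same range check as words[i]
        | some pr =>
          let cl' := cl ++ [w]
          let cs' := PySem.Set.add cs w
          let ws' := pr.2
          if _hf : (cl'.length : Int) = limit ∨ i = ws'.length then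
            pageA_loop limit ws' 0 PySem.Set.empty [] (res ++ [cl'])
          else
            pageA_loop limit ws' i cs' cl' res
      else
        -- words[i] in curr_set: skip it
        if _hf : (cl.length : Int) = limit ∨ i + 1 = ws.length then
          pageA_loop limit ws 0 PySem.Set.empty [] (res ++ [cl])
        else
          pageA_loop limit ws (i + 1) cs cl res
termination_by (ws.length, (if cs = ([] : List String) then 0 else 1), ws.length - i)
decreasing_by
  · -- take, flush: the list got shorter
    have hl := PySem.List.length_of_pop?_eq_some ws hp
    exact Prod.Lex.left _ _ (by omega)
  · -- take, no flush: the list got shorter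
    have hl := PySem.List.length_of_pop?_eq_some ws hp
    exact Prod.Lex.left _ _ (by omega)
  · -- skip, flush: same list, curr_set becomes empty
    have hcs : cs ≠ ([] : List String) := by
      intro hcon; subst hcon
      rw [Bool.not_eq_false, PySem.Set.contains_iff] at hmem
      simp at hmem
    refine Prod.Lex.right _ (Prod.Lex.left _ _ ?_)
    simp [PySem.Set.empty, hcs]
  · -- skip, no flush: same list, same curr_set, i increases
    have hi : i < ws.length := pv_pyGet_lt ws i w hg
    rw [not_or] at _hf
    refine Prod.Lex.right _ (Prod.Lex.right _ ?_)
    omega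

def page_display (words : List String) (limit : Int) : List (List String) :=
  pageA_loop limit words 0 PySem.Set.empty [] []

-- ===== PORT B =====
-- line = distinct[:limit] if limit > 0 else distinct
def bLine (ws : List String) (limit : Int) : List String :=
  if limit > 0 then PySem.List.slice (PySem.List.dedup ws) none (some limit)
  else PySem.List.dedup ws

-- the body of B's inner `for w in ws` loop, on state (taken, out)
def bFilterStep (st : PySem.Set String × List String) (w : String) :
    PySem.Set String × List String :=
  if PySem.Set.contains st.1 w then (PySem.Set.discard st.1 w, st.2)
  else (st.1, st.2 ++ [w])

-- ws after the filtering pass: taken = set(line); out = the kept words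
def bRest (ws : List String) (line : List String) : List String :=
  (ws.foldl bFilterStep (PySem.Set.ofList line, ([] : List String))).2

-- recursive description of the filtering loop (for B's termination proof and the equivalence)
def ffilter (tk : List String) : List String → List String
  | [] => []
  | w :: t => if PySem.Set.contains tk w then ffilter (PySem.Set.discard tk w) t
              else w :: ffilter tk t

theorem bFilter_eq (suf : List String) : ∀ (tk : List String) (out : List String),
    (suf.foldl bFilterStep (tk, out)).2 = out ++ ffilter tk suf := by
  induction suf with
  | nil => intro tk out; simp [ffilter]
  | cons w t ih =>
    intro tk out
    simp only [List.foldl_cons, bFilterStep, ffilter]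
    by_cases h : w ∈ tk
    · simp [h, ih]
    · simp [h, ih]

theorem ffilter_length_le (suf : List String) : ∀ tk, (ffilter tk suf).length ≤ suf.length := by
  induction suf with
  | nil => intro tk; simp [ffilter]
  | cons w t ih =>
    intro tk
    simp only [ffilter]
    split
    · have := ih (PySem.Set.discard tk w)
      simp only [List.length_cons]; omega
    · simpa using ih tk

theorem head_mem_bLine (ws : List String) (hne : ¬ ws = []) (limit : Int) :
    PySem.Set.contains (PySem.Set.ofList (bLine ws limit)) (ws.head hne) = true := by
  cases ws with
  | nil => simp at hne
  | cons w t =>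
    simp only [List.head]
    rw [PySem.Set.contains_iff, PySem.Set.mem_ofList]
    have hd : PySem.List.dedup (w :: t) = w :: PySem.Set.discard (PySem.List.dedup t) w := by
      simp [PySem.List.dedup_eq_ofList, PySem.Set.ofList_cons]
    unfold bLine
    split
    · rename_i hl
      rw [PySem.List.slice_to (xs := PySem.List.dedup (w :: t)) (b := limit) (by omega), hd]
      cases h : limit.toNat with
      | zero => omega
      | succ k => simp [List.take]
    · rw [hd]; simp

-- the remaining words list strictly shrinks on each page (cited by pageB_loop's decreasing_by)
theorem bRest_lt (ws : List String) (hne : ¬ ws = []) (limit : Int) :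
    (bRest ws (bLine ws limit)).length < ws.length := by
  have hline := head_mem_bLine ws hne limit
  cases ws with
  | nil => simp at hne
  | cons w t =>
    unfold bRest
    rw [bFilter_eq]
    simp only [List.head] at hline
    rw [PySem.Set.contains_iff] at hline
    simp only [List.nil_append, ffilter]
    have := ffilter_length_le t (PySem.Set.discard (PySem.Set.ofList (bLine (w :: t) limit)) w)
    simp only [List.length_cons]
    split
    · omega
    · rename_i hcon
      rw [PySem.Set.contains_iff] at hcon
      exact absurd hline hcon

-- B's outer `while ws:` loop
def pageB_loop (limit : Int) (ws : List String) (res : List (List String)) :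
    List (List String) :=
  if hne : ws = [] then res
  else
    let line := bLine ws limit
    pageB_loop limit (bRest ws line) (res ++ [line])
termination_by ws.length
decreasing_by
  exact bRest_lt ws hne limit

def page_display_alt (words : List String) (limit : Int) : List (List String) :=
  pageB_loop limit words []

-- ===== PRECONDITION & SPEC =====
def Spec_page_display (words : List String) (limit : Int) (out : List (List String)) : Prop := out = page_display_alt words limit
instance (words : List String) (limit : Int) (out : List (List String)) : Decidable (Spec_page_display words limit out) := by unfold Spec_page_display; infer_instance

-- ===== CLAIM (what is proved, stated in full; the proofs are below) =====
def Claim_equal_page_display : Prop := ∀ (words : List String) (limit : Int), Dom_page_display words limit → Spec_page_display words limit (page_display words limit)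

-- ===== LEMMAS AND PROOFS =====

-- eraseIdx at the junction of an append
theorem pv_eraseIdx_append (pre t : List String) (w : String) :
    (pre ++ w :: t).eraseIdx pre.length = pre ++ t := by
  induction pre with
  | nil => rfl
  | cons p ps ih => simp [ih]

-- one scanning pass of A, described recursively: from line `cl`, seen-set `cs`, suffix still to
-- scan; returns (the finished line, the leftover suffix words)
def grab (limit : Int) : List String → PySem.Set String → List String → List String × List String
  | cl, cs, [] => (cl, [])
  | cl, cs, w :: t =>
    if PySem.Set.contains cs w then
      if ((cl.length : Int) = limit ∨ t = []) then (cl, w :: t)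
      else ((grab limit cl cs t).1, w :: (grab limit cl cs t).2)
    else
      if (((cl ++ [w]).length : Int) = limit ∨ t = []) then (cl ++ [w], t)
      else grab limit (cl ++ [w]) (PySem.Set.add cs w) t

-- A's loop, from the middle of a pass, finishes the pass then flushes
theorem scanA (limit : Int) : ∀ (suf : List String), suf ≠ [] →
    ∀ (pre cl : List String) (cs : PySem.Set String) (res : List (List String)),
    pageA_loop limit (pre ++ suf) pre.length cs cl res
      = pageA_loop limit (pre ++ (grab limit cl cs suf).2) 0 PySem.Set.empty []
          (res ++ [(grab limit cl cs suf).1]) := by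
  intro suf
  induction suf with
  | nil => intro h; exact absurd rfl h
  | cons w t ih =>
    intro _ pre cl cs res
    have hlen : pre.length < (pre ++ w :: t).length := by simp
    have hget : PySem.List.pyGet? (pre ++ w :: t) (pre.length : Int) = some w :=
      PySem.List.pyGet?_append_length pre t w
    have hpop : PySem.List.pop? (pre ++ w :: t) (pre.length : Int)
        = some ((pre ++ w :: t)[pre.length], (pre ++ w :: t).eraseIdx pre.length) :=
      PySem.List.pop?_natCast _ _ hlen
    have hel : (pre ++ w :: t)[pre.length] = w := by
      have := hget
      rw [PySem.List.pyGet?_natCast] at this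
      have h2 := List.getElem?_eq_getElem (l := pre ++ w :: t) (i := pre.length) hlen
      rw [h2] at this
      exact (Option.some_injective _ this).symm ▸ rfl
    rw [pv_eraseIdx_append] at hpop
    rw [hel] at hpop
    conv_lhs => rw [pageA_loop]
    rw [dif_neg (by simp)]
    split
    · rename_i heq; rw [hget] at heq; exact absurd heq (by simp)
    · rename_i w2 heq
      rw [hget] at heq
      injection heq with heq; subst heq
      by_cases hmem : PySem.Set.contains cs w = false
      · -- take branch
        have hnmem : w ∉ cs := fun h => by
          rw [(PySem.Set.contains_iff cs w).mpr h] at hmem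
          exact absurd hmem (by simp)
        rw [dif_pos hmem]
        split
        · rename_i heq2; rw [hpop] at heq2; exact absurd heq2 (by simp)
        · rename_i pr heq2
          rw [hpop] at heq2
          injection heq2 with heq2; subst heq2
          have hflushiff : (pre.length = (pre ++ t).length) ↔ t = [] := by
            rw [List.length_append, ← List.length_eq_zero_iff]; omega
          -- grab on w :: t takes the not-contains branch
            -- port's flush condition versus grab's
          by_cases hf : ((cl ++ [w]).length : Int) = limit ∨ t = []
          · have hf' : ((cl ++ [w]).length : Int) = limit ∨ pre.length = (pre ++ t).length := by
              rcases hf with h | h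
              · exact Or.inl h
              · exact Or.inr (hflushiff.mpr h)
            rw [dif_pos hf']
            have hg : grab limit cl cs (w :: t) = (cl ++ [w], t) := by
              rw [grab]; rw [if_neg (by simp [hnmem]), if_pos hf]
            rw [hg]
          · have hf' : ¬(((cl ++ [w]).length : Int) = limit ∨ pre.length = (pre ++ t).length) := by
              rw [not_or] at hf ⊢
              exact ⟨hf.1, fun h => hf.2 (hflushiff.mp h)⟩
            rw [dif_neg hf']
            have ht : t ≠ [] := fun h => hf (Or.inr h)
            have hg : grab limit cl cs (w :: t) = grab limit (cl ++ [w]) (PySem.Set.add cs w) t := by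
              rw [grab]; rw [if_neg (by simp [hnmem]), if_neg hf]
            rw [hg]
            exact ih ht pre (cl ++ [w]) (PySem.Set.add cs w) res
      · -- skip branch
        rw [dif_neg hmem]
        rw [Bool.not_eq_false] at hmem
        have hflushiff : (pre.length + 1 = (pre ++ w :: t).length) ↔ t = [] := by
          rw [List.length_append, List.length_cons, ← List.length_eq_zero_iff]; omega
        by_cases hf : ((cl.length : Int) = limit ∨ t = [])
        · have hf' : (cl.length : Int) = limit ∨ pre.length + 1 = (pre ++ w :: t).length := by
            rcases hf with h | h
            · exact Or.inl h
            · exact Or.inr (hflushiff.mpr h)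
          rw [dif_pos hf']
          have hg : grab limit cl cs (w :: t) = (cl, w :: t) := by
            rw [grab]; rw [if_pos hmem, if_pos hf]
          rw [hg]
        · have hf' : ¬((cl.length : Int) = limit ∨ pre.length + 1 = (pre ++ w :: t).length) := by
            rw [not_or] at hf ⊢
            exact ⟨hf.1, fun h => hf.2 (hflushiff.mp h)⟩
          rw [dif_neg hf']
          have ht : t ≠ [] := fun h => hf (Or.inr h)
          have hg : grab limit cl cs (w :: t) = ((grab limit cl cs t).1, w :: (grab limit cl cs t).2) := by
            rw [grab]; rw [if_pos hmem, if_neg hf]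
          rw [hg]
          have := ih ht (pre ++ [w]) cl cs res
          simpa using this

-- Bool extensionality helper
theorem pv_bool_ext {a b : Bool} (h : a = true ↔ b = true) : a = b := by
  cases a <;> cases b <;> simp_all

theorem ffilter_nil : ∀ t : List String, ffilter [] t = t := by
  intro t; induction t with
  | nil => rfl
  | cons w t ih => rw [ffilter]; simp [PySem.Set.contains, ih]

-- the new distinct values of a suffix, relative to an already-taken line cl
def nd (cl : List String) : List String → List String
  | [] => []
  | w :: t => if cl.contains w then nd cl t else w :: nd (cl ++ [w]) t

theorem mem_nd : ∀ (suf cl : List String) (x : String), x ∈ nd cl suf → x ∉ cl := by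
  intro suf
  induction suf with
  | nil => intro cl x h; simp [nd] at h
  | cons w t ih =>
    intro cl x h
    rw [nd] at h
    split at h
    · exact ih cl x h
    · rename_i hw
      rcases List.mem_cons.mp h with rfl | h2
      · intro hc; exact hw (by simpa using hc)
      · intro hc
        exact (ih (cl ++ [w]) x h2) (by simp [hc])

theorem nd_dedup : ∀ (suf cl : List String),
    nd cl suf = (PySem.List.dedup suf).filter (fun y => !(cl.contains y)) := by
  intro suf
  induction suf with
  | nil => intro cl; simp [nd, PySem.List.dedup, PySem.Set.ofList]
  | cons w t ih =>
    intro cl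
    have hd : PySem.List.dedup (w :: t)
        = w :: (PySem.List.dedup t).filter (fun y => !(y == w)) := by
      rw [PySem.List.dedup_eq_ofList, PySem.Set.ofList_cons, ← PySem.List.dedup_eq_ofList]
      rfl
    rw [nd, hd]
    by_cases hc : cl.contains w = true
    · have hm : w ∈ cl := List.contains_iff_mem.mp hc
      rw [if_pos hc, ih cl]
      simp only [List.filter_cons]
      rw [show (!(cl.contains w)) = false by simp [hm]]
      simp only [Bool.false_eq_true, if_neg (by simp : ¬False)]
      rw [List.filter_filter]
      apply List.filter_congr
      intro a _
      by_cases haw : (a == w) = true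
      · have : a = w := by simpa using haw
        subst this
        have hm : a ∈ cl := by simpa using hc
        simp [hm]
      · simp [haw]
    · rw [if_neg hc, ih (cl ++ [w])]
      simp only [List.filter_cons]
      rw [show (!(cl.contains w)) = true by simp_all]
      simp only [if_pos trivial]
      congr 1
      rw [List.filter_filter]
      apply List.filter_congr
      intro a _
      simp only [List.contains_append]
      by_cases haw : (a == w) = true
      · have : a = w := by simpa using haw
        subst this
        simp
      · have hne : a ≠ w := by simpa using haw
        simp [hne]

-- the line a pass takes, starting from line cl: the next distinct values, capped by limit
def tkOf (limit : Int) (cl : List String) (suf : List String) : List String :=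
  if 0 < limit then (nd cl suf).take ((limit - cl.length).toNat) else nd cl suf

theorem mem_tkOf (limit : Int) (cl suf : List String) (x : String)
    (h : x ∈ tkOf limit cl suf) : x ∉ cl := by
  unfold tkOf at h
  split at h
  · exact mem_nd suf cl x (List.mem_of_mem_take h)
  · exact mem_nd suf cl x h

-- the heart of the equivalence: one scanning pass of A computes B's per-page closed form
theorem grab_eq (limit : Int) : ∀ (suf cl : List String) (cs : PySem.Set String),
    (∀ x : String, cs.contains x = cl.contains x) →
    (0 < limit → (cl.length : Int) < limit) →
    grab limit cl cs suf = (cl ++ tkOf limit cl suf, ffilter (tkOf limit cl suf) suf) := by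
  intro suf
  induction suf with
  | nil =>
    intro cl cs hcs hlt
    rw [grab]
    unfold tkOf
    simp [nd, ffilter]
  | cons w t ih =>
    intro cl cs hcs hlt
    by_cases hc : cl.contains w = true
    · -- skip: w is already on the line
      have hwcl : w ∈ cl := by simpa using hc
      have hcsw : PySem.Set.contains cs w = true := by rw [hcs]; exact hc
      have hne1 : ¬((cl.length : Int) = limit) := by
        by_cases hpos : 0 < limit
        · exact fun h => absurd h (ne_of_lt (hlt hpos))
        · intro h
          have : cl ≠ [] := fun hnil => by simp [hnil] at hwcl
          have : 0 < cl.length := List.length_pos_iff.mpr this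
          omega
      have htk : tkOf limit cl (w :: t) = tkOf limit cl t := by
        unfold tkOf; rw [nd, if_pos hc]
      have hnotk : PySem.Set.contains (tkOf limit cl t) w = false := by
        rw [Bool.eq_false_iff]
        intro hcon
        exact (mem_tkOf limit cl t w ((PySem.Set.contains_iff _ _).mp hcon)) hwcl
      rw [grab, if_pos hcsw]
      by_cases ht : t = []
      · rw [if_pos (Or.inr ht), htk, ht]
        unfold tkOf
        simp [nd, ffilter]
      · rw [if_neg (by simp [hne1, ht]), ih cl cs hcs hlt, htk]
        rw [ffilter, hnotk]
        simp
    · -- take: w starts or extends the line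
      have hcsw : PySem.Set.contains cs w = false := by rw [hcs]; exact (by simpa using hc)
      have hwncl : w ∉ cl := by simpa using hc
      have htk : tkOf limit cl (w :: t) = w :: tkOf limit (cl ++ [w]) t := by
        unfold tkOf
        rw [nd, if_neg hc]
        by_cases hpos : 0 < limit
        · rw [if_pos hpos, if_pos hpos]
          have hk : (limit - (cl.length : Int)).toNat
              = ((limit - ((cl ++ [w]).length : Int)).toNat) + 1 := by
            have := hlt hpos
            simp only [List.length_append, List.length_cons, List.length_nil]
            omega
          rw [hk, List.take_succ_cons]
        · rw [if_neg hpos, if_neg hpos]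
      have hnw : w ∉ cs := fun hcon => by
        rw [(PySem.Set.contains_iff cs w).mpr hcon] at hcsw
        exact absurd hcsw (by simp)
      rw [grab, if_neg (by simp [hnw])]
      by_cases hf : (((cl ++ [w]).length : Int) = limit ∨ t = [])
      · rw [if_pos hf]
        have htk0 : tkOf limit (cl ++ [w]) t = [] := by
          rcases hf with h | h
          · have hpos : 0 < limit := by
              rw [← h]; simp only [List.length_append, List.length_cons, List.length_nil]
              positivity
            unfold tkOf
            rw [if_pos hpos]
            have : (limit - ((cl ++ [w]).length : Int)).toNat = 0 := by omega
            rw [this, List.take_zero]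
          · subst h; unfold tkOf; simp [nd]
        rw [htk, htk0]
        have hcw : PySem.Set.contains [w] w = true := by simp [PySem.Set.contains]
        rw [ffilter, hcw]
        have hdw : PySem.Set.discard ([w] : List String) w = ([] : List String) := by
          simp [PySem.Set.discard]
        rw [if_pos rfl, hdw, ffilter_nil]
      · rw [if_neg hf]
        rw [not_or] at hf
        have hlt' : 0 < limit → (((cl ++ [w]).length : Int)) < limit := by
          intro hpos
          have h1 := hlt hpos
          have h2 := hf.1
          simp only [List.length_append, List.length_cons, List.length_nil] at h2 ⊢
          omega
        have hcs' : ∀ x : String, (PySem.Set.add cs w).contains x = (cl ++ [w]).contains x := by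
          intro x
          apply pv_bool_ext
          rw [PySem.Set.contains_iff, PySem.Set.mem_add]
          constructor
          · intro h
            rcases h with h | h
            · have : x ∈ cl := by
                have := hcs x
                rw [(PySem.Set.contains_iff cs x).mpr h] at this
                simpa using this.symm
              simp [this]
            · simp [h]
          · intro h
            have : x ∈ cl ++ [w] := by simpa using h
            rcases List.mem_append.mp this with h2 | h2
            · left
              have := hcs x
              rw [show cl.contains x = true by simpa using h2] at this
              exact (PySem.Set.contains_iff cs x).mp this
            · right; simpa using h2
        rw [ih (cl ++ [w]) (PySem.Set.add cs w) hcs' hlt', htk]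
        have hwtk : w ∉ tkOf limit (cl ++ [w]) t := by
          intro hcon
          exact (mem_tkOf limit (cl ++ [w]) t w hcon) (by simp)
        have hcw : PySem.Set.contains (w :: tkOf limit (cl ++ [w]) t) w = true := by
          rw [PySem.Set.contains_iff]; simp
        rw [ffilter, hcw, if_pos rfl]
        have hdw : PySem.Set.discard (w :: tkOf limit (cl ++ [w]) t) w
            = tkOf limit (cl ++ [w]) t := by
          show List.filter _ _ = _
          rw [List.filter_cons]
          rw [show (!(w == w)) = false by simp]
          simp only [Bool.false_eq_true, if_neg (by simp : ¬False)]
          apply List.filter_eq_self.mpr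
          intro a ha
          have : a ≠ w := fun h => hwtk (h ▸ ha)
          simpa using this
        rw [hdw]
        simp

theorem nd_fresh (ws : List String) : nd [] ws = PySem.List.dedup ws := by
  rw [nd_dedup]
  apply List.filter_eq_self.mpr
  intro a _
  simp

theorem tk_fresh (limit : Int) (ws : List String) : tkOf limit [] ws = bLine ws limit := by
  unfold tkOf bLine
  rw [nd_fresh]
  by_cases h : 0 < limit
  · rw [if_pos h, if_pos h,
      PySem.List.slice_to (xs := PySem.List.dedup ws) (b := limit) (by omega)]
    norm_num
  · rw [if_neg h, if_neg h]

theorem nodup_bLine (ws : List String) (limit : Int) : (bLine ws limit).Nodup := by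
  have hdd : (PySem.List.dedup ws).Nodup := by
    rw [PySem.List.dedup_eq_ofList]; exact PySem.Set.nodup_ofList ws
  unfold bLine
  split
  · rename_i hpos
    rw [PySem.List.slice_to (xs := PySem.List.dedup ws) (b := limit) (by omega)]
    exact (List.take_sublist _ _).nodup hdd
  · exact hdd

theorem bRest_eq_ffilter (ws : List String) (limit : Int) :
    bRest ws (bLine ws limit) = ffilter (bLine ws limit) ws := by
  unfold bRest
  rw [bFilter_eq, PySem.Set.ofList_eq_self_of_nodup _ (nodup_bLine ws limit)]
  simp

-- both loops produce the same pages, page by page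
theorem mainEq (limit : Int) : ∀ (n : Nat) (ws : List String), ws.length ≤ n →
    ∀ res, pageA_loop limit ws 0 PySem.Set.empty [] res = pageB_loop limit ws res := by
  intro n
  induction n with
  | zero =>
    intro ws h res
    have hws : ws = [] := List.length_eq_zero_iff.mp (Nat.le_zero.mp h)
    subst hws
    rw [pageA_loop, pageB_loop]
    simp
  | succ n ih =>
    intro ws h res
    by_cases hws : ws = []
    · subst hws
      rw [pageA_loop, pageB_loop]
      simp
    · have hscan := scanA limit ws hws [] [] PySem.Set.empty res
      simp only [List.nil_append, List.length_nil] at hscan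
      have hgrab := grab_eq limit ws [] PySem.Set.empty (fun x => rfl)
        (fun hpos => by simpa using hpos)
      rw [tk_fresh] at hgrab
      rw [hgrab] at hscan
      simp only [List.nil_append] at hscan
      rw [hscan, ← bRest_eq_ffilter]
      have hlt := bRest_lt ws hws limit
      rw [ih (bRest ws (bLine ws limit)) (by omega) (res ++ [bLine ws limit])]
      conv_rhs => rw [pageB_loop]
      rw [dif_neg hws]

-- ===== VERDICT (by name: the statement is the Claim_ definition above) =====
theorem page_display_spec : Claim_equal_page_display := by
  unfold Claim_equal_page_display
  intro words limit _
  unfold Spec_page_display page_display page_display_alt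
  exact (mainEq limit words.length words le_rfl []).symm ▸ rfl
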